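-- pv_equiv track=rewrite | github.com/OpenPoliticaOrg/HERMES | tools/network_message_passing_sim.py | _resolve_context
-- ===== SOURCE A (Python) =====
-- def _resolve_context(schedule, step, default_context):
--     if not schedule:
--         return default_context
--     chosen = default_context
--     for start_step, context_name in schedule:
--         if step >= start_step:
--             chosen = context_name
--     return chosen
-- ===== SOURCE B (Python) =====
-- def _resolve_context(schedule, step, default_context):
--     for start_step, context_name in reversed(schedule):
--         if step >= start_step:
--             return context_name
--     return default_context
-- ===== Notes on version B (the rewrite author's own statement) =====
-- stated objective: simpler
-- what changed: Replaces the forward full scan with a running 'chosen' accumulator by a reverse scan that returns the first (i.e. last-in-order) matching entry directly, with no accumulator and no empty-schedule special case.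
import Mathlib
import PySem

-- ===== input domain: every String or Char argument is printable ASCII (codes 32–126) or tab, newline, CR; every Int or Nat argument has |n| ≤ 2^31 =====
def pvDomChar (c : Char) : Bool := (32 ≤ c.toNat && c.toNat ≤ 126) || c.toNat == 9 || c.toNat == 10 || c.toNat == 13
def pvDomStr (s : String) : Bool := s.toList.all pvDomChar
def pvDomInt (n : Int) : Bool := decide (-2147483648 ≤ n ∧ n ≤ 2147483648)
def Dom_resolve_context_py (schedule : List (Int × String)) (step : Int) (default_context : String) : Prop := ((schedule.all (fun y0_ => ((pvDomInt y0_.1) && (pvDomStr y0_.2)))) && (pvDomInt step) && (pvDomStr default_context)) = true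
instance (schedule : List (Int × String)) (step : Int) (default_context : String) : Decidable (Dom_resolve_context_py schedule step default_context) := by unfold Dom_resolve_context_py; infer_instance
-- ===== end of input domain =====

-- B replaces A's forward scan with an accumulator by a reverse scan with early return (simpler: no accumulator, no empty-list special case); return values agree on all inputs.

-- ===== PORT A =====
-- forward loop keeping the last matching context in 'chosen'
def resolve_context_py (schedule : List (Int × String)) (step : Int) (default_context : String) : String :=
  if schedule = [] then default_context
  else schedule.foldl (fun chosen p => if step ≥ p.1 then p.2 else chosen) default_context

-- ===== PORT B =====
-- reverse scan, first match returned directly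
def pvFindRev (l : List (Int × String)) (step : Int) (default_context : String) : String :=
  match l with
  | [] => default_context
  | p :: rest => if step ≥ p.1 then p.2 else pvFindRev rest step default_context

def resolve_context_py_alt (schedule : List (Int × String)) (step : Int) (default_context : String) : String :=
  pvFindRev schedule.reverse step default_context

-- ===== PRECONDITION & SPEC =====
def Spec_resolve_context_py (schedule : List (Int × String)) (step : Int) (default_context : String) (out : String) : Prop := out = resolve_context_py_alt schedule step default_context
instance (schedule : List (Int × String)) (step : Int) (default_context : String) (out : String) : Decidable (Spec_resolve_context_py schedule step default_context out) := by unfold Spec_resolve_context_py; infer_instance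

-- ===== CLAIM (what is proved, stated in full; the proofs are below) =====
def Claim_equal_resolve_context_py : Prop := ∀ (schedule : List (Int × String)) (step : Int) (default_context : String), Dom_resolve_context_py schedule step default_context → Spec_resolve_context_py schedule step default_context (resolve_context_py schedule step default_context)

-- ===== LEMMAS AND PROOFS =====
theorem pvFindRev_append_singleton (l : List (Int × String)) (x : Int × String) (step : Int) (d : String) :
    pvFindRev (l ++ [x]) step d = pvFindRev l step (if step ≥ x.1 then x.2 else d) := by
  induction l with
  | nil => simp [pvFindRev]
  | cons y t iht =>
      simp only [pvFindRev, List.cons_append]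
      rw [iht]

theorem pv_fold_eq_findRev (l : List (Int × String)) (step : Int) (d : String) :
    l.foldl (fun chosen p => if step ≥ p.1 then p.2 else chosen) d
      = pvFindRev l.reverse step d := by
  induction l generalizing d with
  | nil => rfl
  | cons x rest ih =>
      simp only [List.foldl_cons, List.reverse_cons]
      rw [ih, pvFindRev_append_singleton]

-- ===== VERDICT (by name: the statement is the Claim_ definition above) =====
theorem resolve_context_py_spec : Claim_equal_resolve_context_py := by
  intro schedule step d _
  unfold Spec_resolve_context_py resolve_context_py resolve_context_py_alt
  cases schedule with
  | nil => simp [pvFindRev]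
  | cons x rest => simp only [if_neg (List.cons_ne_nil x rest)]; exact pv_fold_eq_findRev _ _ _
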